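-- pv_equiv track=rewrite | github.com/sunnykumar1516/dataStructureandleetcode | DFS.py | dfs
-- ===== SOURCE A (Python) =====
-- def dfs( node, visited, grid, fst, labels):
--
--         visited[node] = 1
--         count_label = [0] * 26
--         count_label[ord(labels[node]) - 97] = 1
--         for item in grid[node]:
--             if visited[item] == 1:
--                 continue
--             # node = item
--             x = dfs(item, visited, grid, fst, labels)
--             for j in range(26):
--                 count_label[j] += x[j]
--         fst[node] = count_label[ord(labels[node]) - 97]
--
--         return count_label
-- ===== SOURCE B (Python) =====
-- def dfs(node, visited, grid, fst, labels):
--     # Iterative postorder DFS with an explicit stack instead of recursion.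
--     # Mutates visited and fst exactly like the recursive version.
--     visited[node] = 1
--     root = [0] * 26
--     root[ord(labels[node]) - 97] = 1
--     stack = [(node, 0, root)]
--     while stack:
--         n, i, arr = stack[-1]
--         if i < len(grid[n]):
--             stack[-1] = (n, i + 1, arr)
--             child = grid[n][i]
--             if visited[child] != 1:
--                 visited[child] = 1
--                 carr = [0] * 26
--                 carr[ord(labels[child]) - 97] = 1
--                 stack.append((child, 0, carr))
--         else:
--             fst[n] = arr[ord(labels[n]) - 97]
--             stack.pop()
--             if stack:
--                 _, _, parr = stack[-1]
--                 for j in range(26):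
--                     parr[j] += arr[j]
--     return root
-- ===== Notes on version B (the rewrite author's own statement) =====
-- stated objective: alternative
-- what changed: The recursive DFS is replaced by an iterative postorder traversal with an explicit stack of (node, child-index, 26-array) frames: a node's array is added into its parent's frame when the node's children are exhausted, reproducing the same visit order, fst writes and return value without recursion.
import Mathlib
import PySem

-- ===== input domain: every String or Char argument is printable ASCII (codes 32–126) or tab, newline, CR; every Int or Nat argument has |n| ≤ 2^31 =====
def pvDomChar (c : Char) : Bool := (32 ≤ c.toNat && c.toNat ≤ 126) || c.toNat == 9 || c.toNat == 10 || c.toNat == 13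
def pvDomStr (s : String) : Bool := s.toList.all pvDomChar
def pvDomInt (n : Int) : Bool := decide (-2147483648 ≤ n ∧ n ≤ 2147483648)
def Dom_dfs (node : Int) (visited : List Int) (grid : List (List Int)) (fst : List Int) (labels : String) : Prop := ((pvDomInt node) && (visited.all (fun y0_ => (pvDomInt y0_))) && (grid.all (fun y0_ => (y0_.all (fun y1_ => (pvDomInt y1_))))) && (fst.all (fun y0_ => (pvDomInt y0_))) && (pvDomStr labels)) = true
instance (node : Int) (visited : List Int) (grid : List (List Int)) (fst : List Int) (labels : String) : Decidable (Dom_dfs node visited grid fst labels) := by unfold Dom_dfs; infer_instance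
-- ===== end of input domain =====

-- B replaces A's recursion by an iterative postorder DFS over an explicit stack of
-- (node, child-index, 26-array) frames (objective: alternative decomposition, same cost).
-- Both versions mutate `visited` and `fst` identically in Python; the equivalence proved
-- here is about the RETURN value.

-- ===== PORT A =====
-- ord(labels[n]) - 97  (shared by both ports, as both Pythons contain this expression)
def pvCode (lab : List Char) (n : Int) : Int := ((PySem.List.pyGetD lab n 'a').toNat : Int) - 97

-- 'for j in range(26): cl[j] += x[j]'  (the same loop occurs in both Pythons)
def pvAdd26 (cl x : List Int) : List Int :=
  (PySem.List.pyRange 0 26 1).foldl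
    (fun cl j => PySem.List.pySetD cl j (PySem.List.pyGetD cl j 0 + PySem.List.pyGetD x j 0)) cl

-- A's recursion, with a fuel counter as a totality guard only (the wrapper passes
-- visited.length + 1, which bounds the recursion depth; `none` = fuel exhausted,
-- proved unreachable under Pre_).
mutual
def dfsA (fa : Nat) (node : Int) (v : List Int) (grid : List (List Int)) (t : List Int)
    (lab : List Char) : Option (List Int × List Int × List Int) :=
  match fa with
  | 0 => none
  | fa + 1 =>
    let v1 := PySem.List.pySetD v node 1                                   -- visited[node] = 1
    let c := pvCode lab node
    let cl := PySem.List.pySetD (List.replicate 26 (0 : Int)) c 1          -- count_label[...] = 1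
    match dfsALoop fa grid lab (PySem.List.pyGetD grid node []) cl v1 t with
    | none => none
    | some (cl, v2, t2) =>
        some (cl, v2, PySem.List.pySetD t2 node (PySem.List.pyGetD cl c 0))  -- fst[node] = ...
termination_by (fa, 0)

-- 'for item in grid[node]: ...'
def dfsALoop (fa : Nat) (grid : List (List Int)) (lab : List Char) (l : List Int)
    (cl v t : List Int) : Option (List Int × List Int × List Int) :=
  match l with
  | [] => some (cl, v, t)
  | item :: rest =>
    if PySem.List.pyGetD v item 0 = 1 then dfsALoop fa grid lab rest cl v t
    else
      match dfsA fa item v grid t lab with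
      | none => none
      | some (x, v', t') => dfsALoop fa grid lab rest (pvAdd26 cl x) v' t'
termination_by (fa, l.length + 1)
end

def dfs (node : Int) (visited : List Int) (grid : List (List Int)) (fst : List Int) (labels : String) : List Int :=
  match dfsA (visited.length + 1) node visited grid fst labels.toList with
  | some (cl, _, _) => cl
  | none => []          -- unreachable under Pre_: the fuel bounds the recursion depth

-- ===== PORT B =====
-- Source B's while loop over the explicit stack (top of stack = head of the list);
-- fuel is a totality guard only (the wrapper passes a bound on the iteration count,
-- proved sufficient under Pre_).
def dfsBLoop (fb : Nat) (stack : List (Int × Nat × List Int)) (v : List Int)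
    (grid : List (List Int)) (t : List Int) (lab : List Char) :
    Option (List Int × List Int × List Int) :=
  match fb with
  | 0 => none
  | fb + 1 =>
    match stack with
    | [] => some ([], v, t)                                                -- 'while stack' exits
    | (n, i, arr) :: rest =>
      let row := PySem.List.pyGetD grid n []
      if i < row.length then
        let child := PySem.List.pyGetD row (i : Int) 0                     -- child = grid[n][i]
        if PySem.List.pyGetD v child 0 ≠ 1 then
          let v1 := PySem.List.pySetD v child 1                            -- visited[child] = 1
          let carr := PySem.List.pySetD (List.replicate 26 (0 : Int)) (pvCode lab child) 1
          dfsBLoop fb ((child, 0, carr) :: (n, i + 1, arr) :: rest) v1 grid t lab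
        else
          dfsBLoop fb ((n, i + 1, arr) :: rest) v grid t lab
      else
        let t1 := PySem.List.pySetD t n (PySem.List.pyGetD arr (pvCode lab n) 0)  -- fst[n] = ...
        match rest with
        | [] => some (arr, v, t1)                                          -- last pop: loop ends
        | (pn, pi, parr) :: rest' =>
            dfsBLoop fb ((pn, pi, pvAdd26 parr arr) :: rest') v grid t1 lab

def dfs_alt (node : Int) (visited : List Int) (grid : List (List Int)) (fst : List Int) (labels : String) : List Int :=
  let lab := labels.toList
  let v := PySem.List.pySetD visited node 1
  let root := PySem.List.pySetD (List.replicate 26 (0 : Int)) (pvCode lab node) 1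
  let s := (grid.map List.length).sum
  match dfsBLoop (visited.length * (s + 2) + s + 2) [(node, 0, root)] v grid fst lab with
  | some (cl, _, _) => cl
  | none => []          -- unreachable under Pre_: the fuel bounds the iteration count

-- ===== PRECONDITION & SPEC =====
-- Pre_ = exactly the closed-form no-raise domain this file claims: the starting node and
-- every neighbour listed anywhere in grid index all four containers in range (Python
-- wraparound included), and every label's code lies in 71..122 so that ord(c)-97 indexes
-- the 26-array without an IndexError. It excludes inputs on which A raises, and (stated
-- in the claim's cites) inputs on which A happens to return only because an out-of-range
-- neighbour, an out-of-range label or a too-short container is never reached by the walk.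
def Pre_dfs (node : Int) (visited : List Int) (grid : List (List Int)) (fst : List Int) (labels : String) : Prop :=
  PySem.Raise.InRange visited.length node ∧
  PySem.Raise.InRange grid.length node ∧
  PySem.Raise.InRange fst.length node ∧
  PySem.Raise.InRange labels.toList.length node ∧
  (∀ row ∈ grid, ∀ e ∈ row,
    PySem.Raise.InRange visited.length e ∧ PySem.Raise.InRange grid.length e ∧
    PySem.Raise.InRange fst.length e ∧ PySem.Raise.InRange labels.toList.length e) ∧
  (labels.toList.all (fun c => 71 ≤ c.toNat && c.toNat ≤ 122)) = true

instance (node : Int) (visited : List Int) (grid : List (List Int)) (fst : List Int) (labels : String) : Decidable (Pre_dfs node visited grid fst labels) := by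
  unfold Pre_dfs PySem.Raise.InRange; infer_instance

def pvWitness_dfs : Int × List Int × List (List Int) × List Int × String :=
  (0, [0, 0], [[1], [0]], [0, 0], "ab")

def Spec_dfs (node : Int) (visited : List Int) (grid : List (List Int)) (fst : List Int) (labels : String) (out : List Int) : Prop := out = dfs_alt node visited grid fst labels
instance (node : Int) (visited : List Int) (grid : List (List Int)) (fst : List Int) (labels : String) (out : List Int) : Decidable (Spec_dfs node visited grid fst labels out) := by unfold Spec_dfs; infer_instance

-- ===== CLAIM (what is proved, stated in full; the proofs are below) =====
def Claim_equal_dfs : Prop := ∀ (node : Int) (visited : List Int) (grid : List (List Int)) (fst : List Int) (labels : String), Dom_dfs node visited grid fst labels → Pre_dfs node visited grid fst labels → Spec_dfs node visited grid fst labels (dfs node visited grid fst labels)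

-- ===== LEMMAS AND PROOFS =====

-- number of not-yet-visited slots (entries ≠ 1)
def pvCnt (v : List Int) : Nat := v.countP (fun x => decide (x ≠ 1))

theorem pvIdx_norm (L : Nat) (i : Int) (h : PySem.Raise.InRange L i) :
    ∃ j : Nat, j < L ∧ PySem.List.pyIdx? L i = some j := by
  obtain ⟨h1, h2⟩ := h
  unfold PySem.List.pyIdx?
  by_cases h0 : 0 ≤ i
  · exact ⟨i.toNat, by omega, by rw [if_pos h0, if_pos h2]⟩
  · exact ⟨L - (-i).toNat, by omega, by rw [if_neg h0, if_pos h1]⟩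

theorem pvIdx_lt (L : Nat) (i : Int) (j : Nat) (h : PySem.List.pyIdx? L i = some j) :
    j < L := by
  unfold PySem.List.pyIdx? at h
  split_ifs at h with h0 hlt hneg <;> (try simp at h) <;> omega

theorem pvNorm (v : List Int) (i : Int) (h : PySem.Raise.InRange v.length i) :
    ∃ j : Nat, j < v.length ∧ (∀ d, PySem.List.pyGetD v i d = v.getD j d) ∧
      (∀ x, PySem.List.pySetD v i x = v.set j x) := by
  obtain ⟨j, hj, hidx⟩ := pvIdx_norm v.length i h
  refine ⟨j, hj, ?_, ?_⟩
  · intro d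
    simp [PySem.List.pyGetD, PySem.List.pyGet?, hidx, List.getD, List.getElem?_eq_getElem hj]
  · intro x
    simp [PySem.List.pySetD, PySem.List.pySet?, hidx]

theorem pvCnt_le_length (v : List Int) : pvCnt v ≤ v.length := by
  exact List.countP_le_length

theorem pvCnt_mark_le (v : List Int) (i : Int) :
    pvCnt (PySem.List.pySetD v i 1) ≤ pvCnt v := by
  unfold pvCnt PySem.List.pySetD PySem.List.pySet?
  cases h : PySem.List.pyIdx? v.length i with
  | none => simp
  | some j =>
    have hj := pvIdx_lt _ _ _ h
    simp only [Option.map_some, Option.getD_some]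
    rw [List.countP_set hj]
    simp only [decide_eq_true_eq]
    split_ifs <;> omega

theorem pvCnt_mark (v : List Int) (i : Int) (h : PySem.Raise.InRange v.length i)
    (hne : PySem.List.pyGetD v i 0 ≠ 1) :
    pvCnt (PySem.List.pySetD v i 1) + 1 = pvCnt v := by
  obtain ⟨j, hj, hget, hset⟩ := pvNorm v i h
  rw [hget 0] at hne
  rw [List.getD_eq_getElem _ _ hj] at hne
  rw [hset 1]
  have hpv : (fun x : Int => decide (x ≠ 1)) v[j] = true := by simp [hne]
  have hpos : 0 < v.countP (fun x => decide (x ≠ 1)) :=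
    List.countP_pos_iff.mpr ⟨v[j], List.getElem_mem hj, hpv⟩
  unfold pvCnt
  rw [List.countP_set hj]
  simp only [hpv, decide_eq_true_eq]
  split_ifs <;> omega

-- dfsA / dfsALoop preserve the visited length and never increase pvCnt
theorem pvA_inv (grid : List (List Int)) (lab : List Char) : ∀ fa : Nat,
    (∀ node v t r, dfsA fa node v grid t lab = some r →
      r.2.1.length = v.length ∧ pvCnt r.2.1 ≤ pvCnt (PySem.List.pySetD v node 1)) ∧
    (∀ l cl v t r, dfsALoop fa grid lab l cl v t = some r →
      r.2.1.length = v.length ∧ pvCnt r.2.1 ≤ pvCnt v) := by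
  intro fa
  induction fa with
  | zero =>
    have hA : ∀ (node : Int) (v t : List Int) r, dfsA 0 node v grid t lab = some r →
        r.2.1.length = v.length ∧ pvCnt r.2.1 ≤ pvCnt (PySem.List.pySetD v node 1) := by
      intro node v t r h; simp [dfsA] at h
    refine ⟨hA, ?_⟩
    intro l
    induction l with
    | nil =>
      intro cl v t r h
      simp only [dfsALoop] at h
      cases h
      exact ⟨rfl, le_refl _⟩
    | cons item rest ihl =>
      intro cl v t r h
      simp only [dfsALoop] at h
      by_cases hv : PySem.List.pyGetD v item 0 = 1
      · rw [if_pos hv] at h; exact ihl _ _ _ _ h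
      · rw [if_neg hv] at h; simp [dfsA] at h
  | succ fa ih =>
    obtain ⟨ihA, ihL⟩ := ih
    have hA : ∀ (node : Int) (v t : List Int) r, dfsA (fa + 1) node v grid t lab = some r →
        r.2.1.length = v.length ∧ pvCnt r.2.1 ≤ pvCnt (PySem.List.pySetD v node 1) := by
      intro node v t r h
      simp only [dfsA] at h
      cases hd : dfsALoop fa grid lab (PySem.List.pyGetD grid node [])
          (PySem.List.pySetD (List.replicate 26 (0 : Int)) (pvCode lab node) 1)
          (PySem.List.pySetD v node 1) t with
      | none => rw [hd] at h; cases h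
      | some s =>
        rw [hd] at h
        obtain ⟨cl2, v2, t2⟩ := s
        cases h
        have := ihL _ _ _ _ _ hd
        simpa [PySem.List.length_pySetD] using this
    refine ⟨hA, ?_⟩
    intro l
    induction l with
    | nil =>
      intro cl v t r h
      simp only [dfsALoop] at h
      cases h
      exact ⟨rfl, le_refl _⟩
    | cons item rest ihl =>
      intro cl v t r h
      simp only [dfsALoop] at h
      by_cases hv : PySem.List.pyGetD v item 0 = 1
      · rw [if_pos hv] at h; exact ihl _ _ _ _ h
      · rw [if_neg hv] at h
        cases hd : dfsA (fa + 1) item v grid t lab with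
        | none => rw [hd] at h; cases h
        | some s =>
          rw [hd] at h
          obtain ⟨x, v', t'⟩ := s
          obtain ⟨hlen, hcnt⟩ := hA _ _ _ _ hd
          obtain ⟨hlen2, hcnt2⟩ := ihl _ _ _ _ h
          refine ⟨by simp_all, ?_⟩
          calc pvCnt r.2.1 ≤ pvCnt v' := hcnt2
            _ ≤ pvCnt (PySem.List.pySetD v item 1) := hcnt
            _ ≤ pvCnt v := pvCnt_mark_le v item

theorem pvRow_ok (grid : List (List Int)) (L : Nat)
    (hG : ∀ row ∈ grid, ∀ e ∈ row, PySem.Raise.InRange L e) (n : Int) :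
    ∀ e ∈ PySem.List.pyGetD grid n ([] : List Int), PySem.Raise.InRange L e := by
  intro e he
  unfold PySem.List.pyGetD at he
  cases hg : PySem.List.pyGet? grid n with
  | none => rw [hg] at he; simp at he
  | some row =>
    rw [hg] at he
    have hrow : row ∈ grid := by apply PySem.List.mem_of_pyGet?_eq_some; exact hg
    exact hG row hrow e he

theorem pvRow_len_le (grid : List (List Int)) (n : Int) :
    (PySem.List.pyGetD grid n ([] : List Int)).length ≤ (grid.map List.length).sum := by
  unfold PySem.List.pyGetD
  cases hg : PySem.List.pyGet? grid n with
  | none => simp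
  | some row =>
    simp only [Option.getD_some]
    have hrow : row ∈ grid := by apply PySem.List.mem_of_pyGet?_eq_some; exact hg
    exact List.single_le_sum (fun x _ => Nat.zero_le x) _ (List.mem_map_of_mem hrow)

-- fuel sufficiency for A under in-range neighbours
theorem pvA_suff (grid : List (List Int)) (lab : List Char) (L : Nat)
    (hG : ∀ row ∈ grid, ∀ e ∈ row, PySem.Raise.InRange L e) : ∀ fa : Nat,
    (∀ node v t, v.length = L → pvCnt (PySem.List.pySetD v node 1) + 1 ≤ fa →
      ∃ r, dfsA fa node v grid t lab = some r) ∧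
    (∀ l, (∀ e ∈ l, PySem.Raise.InRange L e) → ∀ cl v t, v.length = L → pvCnt v ≤ fa →
      ∃ r, dfsALoop fa grid lab l cl v t = some r) := by
  intro fa
  induction fa with
  | zero =>
    have hA : ∀ (node : Int) (v t : List Int), v.length = L →
        pvCnt (PySem.List.pySetD v node 1) + 1 ≤ 0 → ∃ r, dfsA 0 node v grid t lab = some r := by
      intro node v t _ hf; omega
    refine ⟨hA, ?_⟩
    intro l hl
    induction l with
    | nil => intro cl v t _ _; exact ⟨(cl, v, t), by simp [dfsALoop]⟩
    | cons item rest ihl =>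
      intro cl v t hv hf
      by_cases hvis : PySem.List.pyGetD v item 0 = 1
      · obtain ⟨r, hr⟩ := ihl (fun e he => hl e (List.mem_cons_of_mem _ he)) cl v t hv hf
        exact ⟨r, by simp only [dfsALoop]; rw [if_pos hvis]; exact hr⟩
      · exfalso
        have := pvCnt_mark v item (hv ▸ hl item (List.mem_cons_self)) hvis
        omega
  | succ fa ih =>
    obtain ⟨ihA, ihL⟩ := ih
    have hA : ∀ (node : Int) (v t : List Int), v.length = L →
        pvCnt (PySem.List.pySetD v node 1) + 1 ≤ fa + 1 →
        ∃ r, dfsA (fa + 1) node v grid t lab = some r := by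
      intro node v t hv hf
      obtain ⟨r, hr⟩ := ihL (PySem.List.pyGetD grid node []) (pvRow_ok grid L hG node)
        (PySem.List.pySetD (List.replicate 26 (0 : Int)) (pvCode lab node) 1)
        (PySem.List.pySetD v node 1) t (by simp [PySem.List.length_pySetD, hv]) (by omega)
      obtain ⟨cl2, v2, t2⟩ := r
      refine ⟨(cl2, v2, PySem.List.pySetD t2 node (PySem.List.pyGetD cl2 (pvCode lab node) 0)), ?_⟩
      simp only [dfsA]
      rw [hr]
    refine ⟨hA, ?_⟩
    intro l hl
    induction l with
    | nil => intro cl v t _ _; exact ⟨(cl, v, t), by simp [dfsALoop]⟩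
    | cons item rest ihl =>
      intro cl v t hv hf
      by_cases hvis : PySem.List.pyGetD v item 0 = 1
      · obtain ⟨r, hr⟩ := ihl (fun e he => hl e (List.mem_cons_of_mem _ he)) cl v t hv hf
        exact ⟨r, by simp only [dfsALoop]; rw [if_pos hvis]; exact hr⟩
      · have hmark := pvCnt_mark v item (hv ▸ hl item (List.mem_cons_self)) hvis
        obtain ⟨r1, hr1⟩ := hA item v t hv (by omega)
        obtain ⟨x, v', t'⟩ := r1
        obtain ⟨hlen, hcnt⟩ := (pvA_inv grid lab (fa + 1)).1 _ _ _ _ hr1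
        obtain ⟨r2, hr2⟩ := ihl (fun e he => hl e (List.mem_cons_of_mem _ he))
          (pvAdd26 cl x) v' t' (by simp_all) (by simp at hcnt; omega)
        refine ⟨r2, ?_⟩
        simp only [dfsALoop]
        rw [if_neg hvis, hr1]
        exact hr2




-- the simulation: finishing one A-frame equals running B's loop for k more steps
theorem pvSim (grid : List (List Int)) (lab : List Char) (L : Nat)
    (hG : ∀ row ∈ grid, ∀ e ∈ row, PySem.Raise.InRange L e) :
    ∀ fa : Nat, ∀ l (node : Int) (i : Nat) (arr v t cl v' t' : List Int),
    v.length = L →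
    l = (PySem.List.pyGetD grid node ([] : List Int)).drop i →
    dfsALoop fa grid lab l arr v t = some (cl, v', t') →
    ∃ k, k ≤ (pvCnt v - pvCnt v') * ((grid.map List.length).sum + 2) + l.length + 1 ∧
      ∀ fb K, dfsBLoop (k + fb) ((node, i, arr) :: K) v grid t lab =
        (match K with
         | [] => some (cl, v', PySem.List.pySetD t' node (PySem.List.pyGetD cl (pvCode lab node) 0))
         | (pn, pi, parr) :: K' =>
             dfsBLoop fb ((pn, pi, pvAdd26 parr cl) :: K') v' grid
               (PySem.List.pySetD t' node (PySem.List.pyGetD cl (pvCode lab node) 0)) lab) := by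
  intro fa
  induction fa with
  | zero =>
    intro l node
    induction l with
    | nil =>
      intro i arr v t cl v' t' hvL hl hA
      have hdrop : (PySem.List.pyGetD grid node ([] : List Int)).drop i = [] := hl.symm
      have hle : (PySem.List.pyGetD grid node ([] : List Int)).length ≤ i :=
        List.drop_eq_nil_iff.mp hdrop
      simp only [dfsALoop] at hA
      obtain ⟨h1, h2, h3⟩ : arr = cl ∧ v = v' ∧ t = t' := by
        simpa using hA
      subst h1; subst h2; subst h3
      refine ⟨1, by simp, ?_⟩
      intro fb K
      rw [Nat.add_comm 1 fb]
      simp only [dfsBLoop]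
      rw [if_neg (by omega)]
    | cons item rest ihl =>
      intro i arr v t cl v' t' hvL hl hA
      simp only [dfsALoop] at hA
      by_cases hvis : PySem.List.pyGetD v item 0 = 1
      · -- skipped child
        rw [if_pos hvis] at hA
        have hlen : (PySem.List.pyGetD grid node ([] : List Int)).length - i = rest.length + 1 := by
          rw [← List.length_drop, ← hl]; simp
        have hi : i < (PySem.List.pyGetD grid node ([] : List Int)).length := by omega
        rw [List.drop_eq_getElem_cons hi] at hl
        injection hl with hitem hrest
        obtain ⟨k2, hb2, hrun2⟩ := ihl (i + 1) arr v t cl v' t' hvL hrest hA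
        refine ⟨k2 + 1, by simp only [List.length_cons]; omega, ?_⟩
        intro fb K
        have hsh : k2 + 1 + fb = (k2 + fb) + 1 := by omega
        rw [hsh]
        simp only [dfsBLoop]
        rw [if_pos hi]
        have hchild : PySem.List.pyGetD (PySem.List.pyGetD grid node ([] : List Int)) (i : Int) 0 = item := by
          rw [PySem.List.pyGetD_natCast, List.getD_eq_getElem _ _ hi, ← hitem]
        rw [hchild, if_neg (by simp [hvis])]
        exact hrun2 fb K
      · -- unvisited child: dfsA 0 = none, contradiction
        rw [if_neg hvis] at hA
        simp [dfsA] at hA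
  | succ fa ih =>
    intro l node
    induction l with
    | nil =>
      intro i arr v t cl v' t' hvL hl hA
      have hdrop : (PySem.List.pyGetD grid node ([] : List Int)).drop i = [] := hl.symm
      have hle : (PySem.List.pyGetD grid node ([] : List Int)).length ≤ i :=
        List.drop_eq_nil_iff.mp hdrop
      simp only [dfsALoop] at hA
      obtain ⟨h1, h2, h3⟩ : arr = cl ∧ v = v' ∧ t = t' := by
        simpa using hA
      subst h1; subst h2; subst h3
      refine ⟨1, by simp, ?_⟩
      intro fb K
      rw [Nat.add_comm 1 fb]
      simp only [dfsBLoop]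
      rw [if_neg (by omega)]
    | cons item rest ihl =>
      intro i arr v t cl v' t' hvL hl hA
      simp only [dfsALoop] at hA
      have hlen : (PySem.List.pyGetD grid node ([] : List Int)).length - i = rest.length + 1 := by
        rw [← List.length_drop, ← hl]; simp
      have hi : i < (PySem.List.pyGetD grid node ([] : List Int)).length := by omega
      rw [List.drop_eq_getElem_cons hi] at hl
      injection hl with hitem hrest
      have hchild : PySem.List.pyGetD (PySem.List.pyGetD grid node ([] : List Int)) (i : Int) 0 = item := by
        rw [PySem.List.pyGetD_natCast, List.getD_eq_getElem _ _ hi, ← hitem]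
      by_cases hvis : PySem.List.pyGetD v item 0 = 1
      · -- skipped child
        rw [if_pos hvis] at hA
        obtain ⟨k2, hb2, hrun2⟩ := ihl (i + 1) arr v t cl v' t' hvL hrest hA
        refine ⟨k2 + 1, by simp only [List.length_cons]; omega, ?_⟩
        intro fb K
        have hsh : k2 + 1 + fb = (k2 + fb) + 1 := by omega
        rw [hsh]
        simp only [dfsBLoop]
        rw [if_pos hi, hchild, if_neg (by simp [hvis])]
        exact hrun2 fb K
      · -- pushed child
        rw [if_neg hvis] at hA
        cases hd : dfsA (fa + 1) item v grid t lab with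
        | none => rw [hd] at hA; cases hA
        | some s =>
          rw [hd] at hA
          obtain ⟨x, v2, t2⟩ := s
          -- unfold the child's recursive call
          simp only [dfsA] at hd
          cases hinner : dfsALoop fa grid lab (PySem.List.pyGetD grid item [])
              (PySem.List.pySetD (List.replicate 26 (0 : Int)) (pvCode lab item) 1)
              (PySem.List.pySetD v item 1) t with
          | none => rw [hinner] at hd; cases hd
          | some s2 =>
            rw [hinner] at hd
            obtain ⟨xx, vv, tt⟩ := s2
            obtain ⟨hx, hv2, ht2⟩ : xx = x ∧ vv = v2 ∧
                PySem.List.pySetD tt item (PySem.List.pyGetD xx (pvCode lab item) 0) = t2 := by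
              simpa using hd
            -- the item really is unvisited and in range
            have hitemmem : item ∈ PySem.List.pyGetD grid node ([] : List Int) := by
              have hmem : item ∈ (PySem.List.pyGetD grid node ([] : List Int)).drop i := by
                rw [List.drop_eq_getElem_cons hi, ← hitem]
                exact List.mem_cons_self
              exact List.mem_of_mem_drop hmem
            have hitemrange : PySem.Raise.InRange L item :=
              pvRow_ok grid L hG node item hitemmem
            have hmark := pvCnt_mark v item (hvL ▸ hitemrange) hvis
            have hmarklen : (PySem.List.pySetD v item 1).length = L := by
              rw [PySem.List.length_pySetD, hvL]
            -- simulate the child's whole subtree (outer IH, smaller fuel)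
            obtain ⟨k1, hb1, hrun1⟩ := ih (PySem.List.pyGetD grid item []) item 0
              (PySem.List.pySetD (List.replicate 26 (0 : Int)) (pvCode lab item) 1)
              (PySem.List.pySetD v item 1) t xx vv tt hmarklen List.drop_zero.symm hinner
            -- invariants of the child run
            obtain ⟨hlenvv, hcntvv⟩ := (pvA_inv grid lab fa).2 _ _ _ _ _ hinner
            -- simulate the remaining siblings (list IH, same fuel)
            obtain ⟨k2, hb2, hrun2⟩ := ihl (i + 1) (pvAdd26 arr x) v2 t2 cl v' t'
              (by rw [← hv2, hlenvv, hmarklen]) hrest hA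
            obtain ⟨hlenv', hcntv'⟩ := (pvA_inv grid lab (fa + 1)).2 _ _ _ _ _ hA
            refine ⟨1 + k1 + k2, ?_, ?_⟩
            · -- fuel accounting
              have hrowlen : (PySem.List.pyGetD grid item ([] : List Int)).length ≤
                  (grid.map List.length).sum := pvRow_len_le grid item
              have e1 : pvCnt (PySem.List.pySetD v item 1) + 1 = pvCnt v := hmark
              have e2 : pvCnt vv ≤ pvCnt (PySem.List.pySetD v item 1) := by
                simpa using hcntvv
              have e3 : pvCnt v' ≤ pvCnt v2 := hcntv'
              have e4 : pvCnt v2 = pvCnt vv := by rw [hv2]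
              have hexp : (pvCnt v - pvCnt v') * ((grid.map List.length).sum + 2) =
                  (pvCnt (PySem.List.pySetD v item 1) - pvCnt vv) * ((grid.map List.length).sum + 2)
                  + (pvCnt v2 - pvCnt v') * ((grid.map List.length).sum + 2)
                  + ((grid.map List.length).sum + 2) := by
                have hsplit : pvCnt v - pvCnt v' =
                    (pvCnt (PySem.List.pySetD v item 1) - pvCnt vv) + (pvCnt v2 - pvCnt v') + 1 := by
                  omega
                rw [hsplit]; ring
              simp only [List.length_cons]
              omega
            · intro fb K
              have hsh : 1 + k1 + k2 + fb = (k1 + (k2 + fb)) + 1 := by omega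
              rw [hsh]
              simp only [dfsBLoop]
              rw [if_pos hi, hchild, if_pos (by simp [hvis])]
              rw [hrun1 (k2 + fb) ((node, i + 1, arr) :: K)]
              rw [ht2, hx, hv2]
              exact hrun2 fb K

-- ===== VERDICT (by name: the statement is the Claim_ definition above) =====
theorem dfs_spec : Claim_equal_dfs := by
  unfold Claim_equal_dfs
  intro node visited grid fst labels _ hPre
  unfold Spec_dfs
  obtain ⟨hn1, hn2, hn3, hn4, hG', hlab⟩ := hPre
  have hG : ∀ row ∈ grid, ∀ e ∈ row, PySem.Raise.InRange visited.length e :=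
    fun row hr e he => (hG' row hr e he).1
  -- A's recursion succeeds within its fuel
  have hbound : pvCnt (PySem.List.pySetD visited node 1) + 1 ≤ visited.length + 1 := by
    have := pvCnt_le_length (PySem.List.pySetD visited node 1)
    rw [PySem.List.length_pySetD] at this
    omega
  obtain ⟨⟨cl, v2, t2⟩, hr⟩ :=
    (pvA_suff grid labels.toList visited.length hG (visited.length + 1)).1
      node visited fst rfl hbound
  simp only [dfsA] at hr
  cases hinner : dfsALoop visited.length grid labels.toList
      (PySem.List.pyGetD grid node [])
      (PySem.List.pySetD (List.replicate 26 (0 : Int)) (pvCode labels.toList node) 1)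
      (PySem.List.pySetD visited node 1) fst with
  | none => rw [hinner] at hr; cases hr
  | some s =>
    obtain ⟨cl0, vv, tt⟩ := s
    have hAfull : dfs node visited grid fst labels = cl0 := by
      unfold dfs
      simp only [dfsA]
      rw [hinner]
    -- simulate with B's loop
    obtain ⟨k, hk, hrun⟩ := pvSim grid labels.toList visited.length hG visited.length
      (PySem.List.pyGetD grid node []) node 0
      (PySem.List.pySetD (List.replicate 26 (0 : Int)) (pvCode labels.toList node) 1)
      (PySem.List.pySetD visited node 1) fst cl0 vv tt
      (by rw [PySem.List.length_pySetD]) List.drop_zero.symm hinner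
    -- B's fuel is at least k
    have hcnt1 : pvCnt (PySem.List.pySetD visited node 1) ≤ visited.length := by
      have := pvCnt_le_length (PySem.List.pySetD visited node 1)
      rw [PySem.List.length_pySetD] at this
      exact this
    have hrowlen : (PySem.List.pyGetD grid node ([] : List Int)).length ≤
        (grid.map List.length).sum := pvRow_len_le grid node
    have hprod : (pvCnt (PySem.List.pySetD visited node 1) - pvCnt vv) *
        ((grid.map List.length).sum + 2) ≤
        visited.length * ((grid.map List.length).sum + 2) :=
      Nat.mul_le_mul_right _ (by omega)
    have hkF : k ≤ visited.length * ((grid.map List.length).sum + 2) +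
        (grid.map List.length).sum + 2 := by omega
    have hBfull : dfs_alt node visited grid fst labels = cl0 := by
      unfold dfs_alt
      have hsplit : visited.length * ((grid.map List.length).sum + 2) +
          (grid.map List.length).sum + 2 =
          k + (visited.length * ((grid.map List.length).sum + 2) +
            (grid.map List.length).sum + 2 - k) := by omega
      simp only []
      rw [hsplit]
      rw [hrun _ []]
    rw [hAfull, hBfull]
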